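-- pv_equiv track=rewrite | github.com/miliar/Code_Jam_Webscraper | solutions_python/Problem_179/1707.py | to_rad
-- ===== SOURCE A (Python) =====
-- def to_rad(v, r):
--     res = 0
--     m = 1
--     while v > 0:
--         res += m * (v & 1)
--         m *= r
--         v >>= 1
--     return res
-- ===== SOURCE B (Python) =====
-- def to_rad(v, r):
--     # Horner evaluation over the binary digits of v, most-significant first.
--     if v <= 0:
--         return 0
--     res = 0
--     for c in bin(v)[2:]:
--         res = res * r + int(c)
--     return res
-- ===== Notes on version B (the rewrite author's own statement) =====
-- stated objective: alternative
-- what changed: Replaces the LSB-first loop that maintains a running power m with a single Horner fold res = res*r + bit over the binary digits most-significant-first, keeping no power variable.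
import Mathlib
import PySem

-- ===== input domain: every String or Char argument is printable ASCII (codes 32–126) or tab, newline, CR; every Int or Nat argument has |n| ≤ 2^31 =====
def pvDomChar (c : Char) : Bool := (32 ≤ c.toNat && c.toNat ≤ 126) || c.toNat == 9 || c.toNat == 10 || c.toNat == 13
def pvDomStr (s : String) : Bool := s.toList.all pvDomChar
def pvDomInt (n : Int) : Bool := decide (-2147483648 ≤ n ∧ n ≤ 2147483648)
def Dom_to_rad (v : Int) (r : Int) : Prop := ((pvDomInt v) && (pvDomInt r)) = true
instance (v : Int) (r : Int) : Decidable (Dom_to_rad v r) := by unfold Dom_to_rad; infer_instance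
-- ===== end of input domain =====

-- B replaces the LSB-first loop with a power accumulator by a Horner fold over the binary digits MSB-first (alternative decomposition, same cost).


-- ===== PORT A =====
-- while v > 0: res += m * (v & 1); m *= r; v >>= 1   (for v > 0, v & 1 = v % 2 and v >> 1 = v // 2)
def to_rad_go (r : Int) (v : Int) (res : Int) (m : Int) : Int :=
  if h : 0 < v then
    to_rad_go r (PySem.Int.floordiv v 2) (res + m * PySem.Int.mod v 2) (m * r)
  else
    res
termination_by v.toNat
decreasing_by
  have h2 : PySem.Int.floordiv v 2 = v / 2 := PySem.Int.floordiv_eq_ediv_of_pos (by omega)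
  rw [h2]; omega

def to_rad (v : Int) (r : Int) : Int := to_rad_go r v 0 1

-- ===== PORT B =====
-- binary digits of n, most-significant first (the characters of bin(v)[2:] as ints)
def to_rad_bits : Nat → List Int
  | 0 => []
  | n + 1 => to_rad_bits ((n + 1) / 2) ++ [(((n + 1) % 2 : Nat) : Int)]

def to_rad_alt (v : Int) (r : Int) : Int :=
  if v ≤ 0 then 0
  else (to_rad_bits v.toNat).foldl (fun res b => res * r + b) 0

-- ===== PRECONDITION & SPEC =====
def Spec_to_rad (v : Int) (r : Int) (out : Int) : Prop := out = to_rad_alt v r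
instance (v : Int) (r : Int) (out : Int) : Decidable (Spec_to_rad v r out) := by unfold Spec_to_rad; infer_instance

-- ===== CLAIM (what is proved, stated in full; the proofs are below) =====
def Claim_equal_to_rad : Prop := ∀ (v : Int) (r : Int), Dom_to_rad v r → Spec_to_rad v r (to_rad v r)

-- ===== LEMMAS AND PROOFS =====

-- reference value: f 0 = 0, f n = r * f (n/2) + n % 2
def to_rad_ref (r : Int) : Nat → Int
  | 0 => 0
  | n + 1 => r * to_rad_ref r ((n + 1) / 2) + (((n + 1) % 2 : Nat) : Int)

theorem to_rad_go_eq (r : Int) : ∀ (n : Nat) (res m : Int),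
    to_rad_go r (n : Int) res m = res + m * to_rad_ref r n := by
  intro n
  induction n using Nat.strong_induction_on with
  | _ n ih =>
    intro res m
    match n with
    | 0 => simp [to_rad_go, to_rad_ref]
    | k + 1 =>
      rw [to_rad_go]
      have hpos : (0 : Int) < (k + 1 : Nat) := by exact_mod_cast Nat.succ_pos k
      rw [dif_pos hpos]
      have hfd : PySem.Int.floordiv ((k + 1 : Nat) : Int) 2 = (((k + 1) / 2 : Nat) : Int) :=
        PySem.Int.floordiv_natCast (k + 1) 2
      have hmd : PySem.Int.mod ((k + 1 : Nat) : Int) 2 = (((k + 1) % 2 : Nat) : Int) :=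
        PySem.Int.mod_natCast (k + 1) 2
      rw [hfd, hmd, ih ((k + 1) / 2) (Nat.div_lt_self (Nat.succ_pos k) (by norm_num))]
      rw [to_rad_ref]
      ring

theorem to_rad_foldl_append (r : Int) (xs : List Int) (b acc : Int) :
    (xs ++ [b]).foldl (fun res b => res * r + b) acc
      = (xs.foldl (fun res b => res * r + b) acc) * r + b := by
  simp [List.foldl_append]

theorem to_rad_bits_foldl (r : Int) : ∀ (n : Nat),
    (to_rad_bits n).foldl (fun res b => res * r + b) 0 = to_rad_ref r n := by
  intro n
  induction n using Nat.strong_induction_on with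
  | _ n ih =>
    match n with
    | 0 => simp [to_rad_bits, to_rad_ref]
    | k + 1 =>
      rw [to_rad_bits, to_rad_foldl_append,
        ih ((k + 1) / 2) (Nat.div_lt_self (Nat.succ_pos k) (by norm_num)), to_rad_ref]
      ring

-- ===== VERDICT (by name: the statement is the Claim_ definition above) =====
theorem to_rad_spec : Claim_equal_to_rad := by
  intro v r _
  unfold Spec_to_rad to_rad to_rad_alt
  by_cases hv : v ≤ 0
  · rw [if_pos hv, to_rad_go, dif_neg (by omega)]
  · rw [if_neg hv]
    have hcast : ((v.toNat : Int)) = v := Int.toNat_of_nonneg (by omega)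
    calc to_rad_go r v 0 1 = to_rad_go r (v.toNat : Int) 0 1 := by rw [hcast]
      _ = 0 + 1 * to_rad_ref r v.toNat := to_rad_go_eq r v.toNat 0 1
      _ = to_rad_ref r v.toNat := by ring
      _ = _ := (to_rad_bits_foldl r v.toNat).symm
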